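-- pv_equiv track=rewrite | github.com/MateuszTk/Kostkownik | src/camera.py | FinishCorner
-- ===== SOURCE A (Python) =====
-- def FinishCorner(colorA, colorB):
--     if colorA == "X" or colorB == "X" or colorA == colorB:
--         return "X"
--
--     corners = ["OBY", "BRY", "RGY", "GOY", "OGW", "GRW", "RBW", "BOW"]
--
--     for i in range(0, 3):
--         for i in range(0, 8):
--             if colorA == corners[i][0] and colorB == corners[i][1]:
--                 return corners[i][2]
--
--             popped = corners[i][0]
--             corners[i] = corners[i][1:]
--             corners[i] = corners[i] + popped
--
--     return "X"
-- ===== SOURCE B (Python) =====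
-- # Flat lookup table: each corner triple and its cyclic rotations, (first, second) -> third.
-- _TABLE = [
--     ("O", "B", "Y"), ("B", "Y", "O"), ("Y", "O", "B"),
--     ("B", "R", "Y"), ("R", "Y", "B"), ("Y", "B", "R"),
--     ("R", "G", "Y"), ("G", "Y", "R"), ("Y", "R", "G"),
--     ("G", "O", "Y"), ("O", "Y", "G"), ("Y", "G", "O"),
--     ("O", "G", "W"), ("G", "W", "O"), ("W", "O", "G"),
--     ("G", "R", "W"), ("R", "W", "G"), ("W", "G", "R"),
--     ("R", "B", "W"), ("B", "W", "R"), ("W", "R", "B"),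
--     ("B", "O", "W"), ("O", "W", "B"), ("W", "B", "O"),
-- ]
--
-- def FinishCorner(colorA, colorB):
--     if colorA == "X" or colorB == "X" or colorA == colorB:
--         return "X"
--     for a, b, c in _TABLE:
--         if colorA == a and colorB == b:
--             return c
--     return "X"
-- ===== Notes on version B (the rewrite author's own statement) =====
-- stated objective: simpler
-- what changed: Replaces the triple-pass loop that destructively rotates all eight corner strings in place with a single scan over a precomputed flat table of the 24 (first, second, third) rotations.
import Mathlib
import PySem

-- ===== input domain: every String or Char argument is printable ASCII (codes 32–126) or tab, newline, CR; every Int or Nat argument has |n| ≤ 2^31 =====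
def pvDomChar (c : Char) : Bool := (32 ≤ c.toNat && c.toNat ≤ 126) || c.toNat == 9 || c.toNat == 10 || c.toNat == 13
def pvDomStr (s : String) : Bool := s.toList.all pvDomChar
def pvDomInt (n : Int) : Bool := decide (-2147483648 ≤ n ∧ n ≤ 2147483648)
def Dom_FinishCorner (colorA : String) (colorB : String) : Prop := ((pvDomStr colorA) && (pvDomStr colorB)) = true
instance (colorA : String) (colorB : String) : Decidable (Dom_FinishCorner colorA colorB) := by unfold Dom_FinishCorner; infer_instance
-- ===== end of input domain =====

-- B replaces A's three passes that rotate the eight corner strings in place by a single scan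
-- of a precomputed 24-entry (first, second) -> third table (simpler; same result).

-- ===== PORT A =====
-- Python's s[i] on a str yields a 1-character str; in A the index is always in range
-- (the corner strings keep length 3 under rotation), so the "" branch (IndexError) is never reached.
def pyCharStr (s : String) (i : Int) : String :=
  match PySem.Str.pyGet? s i with
  | some c => String.ofList [c]
  | none => ""

-- the inner 'for i in range(0, 8)' loop: check corner i, else rotate it in place; early return via Option
def innerA (colorA : String) (colorB : String) : List String → Option String × List String
  | [] => (none, [])
  | c :: rest =>
    if colorA = pyCharStr c 0 ∧ colorB = pyCharStr c 1 then
      (some (pyCharStr c 2), c :: rest)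
    else
      let popped := pyCharStr c 0
      let c' := PySem.Str.slice c (some 1) none ++ popped
      let (res, rest') := innerA colorA colorB rest
      (res, c' :: rest')

-- the outer 'for i in range(0, 3)' loop over the mutated corners list
def outerA (colorA : String) (colorB : String) : Nat → List String → String
  | 0, _ => "X"
  | n + 1, corners =>
    match innerA colorA colorB corners with
    | (some r, _) => r
    | (none, corners') => outerA colorA colorB n corners'

def FinishCorner (colorA : String) (colorB : String) : String :=
  if colorA = "X" ∨ colorB = "X" ∨ colorA = colorB then "X"
  else outerA colorA colorB 3 ["OBY", "BRY", "RGY", "GOY", "OGW", "GRW", "RBW", "BOW"]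

-- ===== PORT B =====
def tableB : List (String × String × String) :=
  [("O", "B", "Y"), ("B", "Y", "O"), ("Y", "O", "B"),
   ("B", "R", "Y"), ("R", "Y", "B"), ("Y", "B", "R"),
   ("R", "G", "Y"), ("G", "Y", "R"), ("Y", "R", "G"),
   ("G", "O", "Y"), ("O", "Y", "G"), ("Y", "G", "O"),
   ("O", "G", "W"), ("G", "W", "O"), ("W", "O", "G"),
   ("G", "R", "W"), ("R", "W", "G"), ("W", "G", "R"),
   ("R", "B", "W"), ("B", "W", "R"), ("W", "R", "B"),
   ("B", "O", "W"), ("O", "W", "B"), ("W", "B", "O")]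

def scanB (colorA : String) (colorB : String) : List (String × String × String) → String
  | [] => "X"
  | (a, b, c) :: rest => if colorA = a ∧ colorB = b then c else scanB colorA colorB rest

def FinishCorner_alt (colorA : String) (colorB : String) : String :=
  if colorA = "X" ∨ colorB = "X" ∨ colorA = colorB then "X"
  else scanB colorA colorB tableB

-- ===== PRECONDITION & SPEC =====
def Spec_FinishCorner (colorA : String) (colorB : String) (out : String) : Prop := out = FinishCorner_alt colorA colorB
instance (colorA : String) (colorB : String) (out : String) : Decidable (Spec_FinishCorner colorA colorB out) := by unfold Spec_FinishCorner; infer_instance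

-- ===== CLAIM (what is proved, stated in full; the proofs are below) =====
def Claim_equal_FinishCorner : Prop := ∀ (colorA : String) (colorB : String), Dom_FinishCorner colorA colorB → Spec_FinishCorner colorA colorB (FinishCorner colorA colorB)

-- ===== LEMMAS AND PROOFS =====

-- the rotation A performs on a non-matching corner
def rotA (c : String) : String := PySem.Str.slice c (some 1) none ++ pyCharStr c 0

-- a corner string: three characters, all among the six face letters
def invC (c : String) : Prop :=
  c.toList.length = 3 ∧ ∀ ch ∈ c.toList, ch ∈ (['O', 'B', 'R', 'G', 'Y', 'W'] : List Char)

theorem caseSix (s : String) :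
    s = "O" ∨ s = "B" ∨ s = "R" ∨ s = "G" ∨ s = "Y" ∨ s = "W" ∨
    (s ≠ "O" ∧ s ≠ "B" ∧ s ≠ "R" ∧ s ≠ "G" ∧ s ≠ "Y" ∧ s ≠ "W") := by
  by_cases h1 : s = "O" <;> by_cases h2 : s = "B" <;> by_cases h3 : s = "R" <;>
    by_cases h4 : s = "G" <;> by_cases h5 : s = "Y" <;> by_cases h6 : s = "W" <;> tauto

theorem pyCharStr0 {c : String} {a b d : Char} (h : c.toList = [a, b, d]) :
    pyCharStr c 0 = String.ofList [a] := by
  simp [pyCharStr, h]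

theorem pyCharStr1 {c : String} {a b d : Char} (h : c.toList = [a, b, d]) :
    pyCharStr c 1 = String.ofList [b] := by
  simp [pyCharStr, h]

theorem rotA_toList {c : String} {a b d : Char} (h : c.toList = [a, b, d]) :
    (rotA c).toList = [b, d, a] := by
  simp [rotA, pyCharStr0 h, PySem.Str.toList_slice, h, PySem.List.slice_from_one]

theorem rotA_invC {c : String} (h : invC c) : invC (rotA c) := by
  obtain ⟨hlen, hmem⟩ := h
  obtain ⟨a, b, d, habd⟩ := List.length_eq_three.mp hlen
  constructor
  · simp [rotA_toList habd]
  · intro ch hch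
    rw [rotA_toList habd] at hch
    apply hmem
    rw [habd]
    simp at hch ⊢
    tauto

theorem innerA_none (cA cB : String) (cs : List String)
    (h : ∀ c ∈ cs, ¬(cA = pyCharStr c 0 ∧ cB = pyCharStr c 1)) :
    innerA cA cB cs = (none, cs.map rotA) := by
  induction cs with
  | nil => simp [innerA]
  | cons c rest ih =>
    have hc := h c (by simp)
    simp only [innerA, if_neg hc, ih (fun x hx => h x (by simp [hx]))]
    rfl

theorem outerA_X (cA cB : String)
    (hmis : ∀ c, invC c → ¬(cA = pyCharStr c 0 ∧ cB = pyCharStr c 1)) :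
    ∀ (n : Nat) (cs : List String), (∀ c ∈ cs, invC c) → outerA cA cB n cs = "X" := by
  intro n
  induction n with
  | zero => intro cs _; rfl
  | succ m ih =>
    intro cs hcs
    rw [outerA, innerA_none cA cB cs (fun c hc => hmis c (hcs c hc))]
    exact ih _ (by
      intro c hc
      obtain ⟨c0, hc0, rfl⟩ := List.mem_map.mp hc
      exact rotA_invC (hcs c0 hc0))

-- if colorA is not one of the six one-letter strings, no corner ever matches in A
theorem hmisA {cA cB : String}
    (h1 : cA ≠ "O") (h2 : cA ≠ "B") (h3 : cA ≠ "R") (h4 : cA ≠ "G") (h5 : cA ≠ "Y") (h6 : cA ≠ "W") :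
    ∀ c, invC c → ¬(cA = pyCharStr c 0 ∧ cB = pyCharStr c 1) := by
  intro c ⟨hlen, hmem⟩ ⟨hA, _⟩
  obtain ⟨a, b, d, habd⟩ := List.length_eq_three.mp hlen
  rw [pyCharStr0 habd] at hA
  have ha : a ∈ (['O', 'B', 'R', 'G', 'Y', 'W'] : List Char) := hmem a (by simp [habd])
  simp at ha
  rcases ha with rfl | rfl | rfl | rfl | rfl | rfl <;> simp_all

-- if colorB is not one of the six one-letter strings, no corner ever matches in A
theorem hmisB {cA cB : String}
    (h1 : cB ≠ "O") (h2 : cB ≠ "B") (h3 : cB ≠ "R") (h4 : cB ≠ "G") (h5 : cB ≠ "Y") (h6 : cB ≠ "W") :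
    ∀ c, invC c → ¬(cA = pyCharStr c 0 ∧ cB = pyCharStr c 1) := by
  intro c ⟨hlen, hmem⟩ ⟨_, hB⟩
  obtain ⟨a, b, d, habd⟩ := List.length_eq_three.mp hlen
  rw [pyCharStr1 habd] at hB
  have hb : b ∈ (['O', 'B', 'R', 'G', 'Y', 'W'] : List Char) := hmem b (by simp [habd])
  simp at hb
  rcases hb with rfl | rfl | rfl | rfl | rfl | rfl <;> simp_all

theorem FinA_X {cA cB : String}
    (hmis : ∀ c, invC c → ¬(cA = pyCharStr c 0 ∧ cB = pyCharStr c 1)) :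
    FinishCorner cA cB = "X" := by
  unfold FinishCorner
  split
  · rfl
  · exact outerA_X cA cB hmis 3 _ (by
      intro c hc
      simp at hc
      rcases hc with rfl | rfl | rfl | rfl | rfl | rfl | rfl | rfl <;>
        exact ⟨by simp, by simp⟩)

theorem FinAltA_X {cA cB : String}
    (h1 : cA ≠ "O") (h2 : cA ≠ "B") (h3 : cA ≠ "R") (h4 : cA ≠ "G") (h5 : cA ≠ "Y") (h6 : cA ≠ "W") :
    FinishCorner_alt cA cB = "X" := by
  unfold FinishCorner_alt
  split
  · rfl
  · simp [scanB, tableB, h1, h2, h3, h4, h5, h6]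

theorem FinAltB_X {cA cB : String}
    (h1 : cB ≠ "O") (h2 : cB ≠ "B") (h3 : cB ≠ "R") (h4 : cB ≠ "G") (h5 : cB ≠ "Y") (h6 : cB ≠ "W") :
    FinishCorner_alt cA cB = "X" := by
  unfold FinishCorner_alt
  split
  · rfl
  · simp [scanB, tableB, h1, h2, h3, h4, h5, h6]

-- ===== VERDICT (by name: the statement is the Claim_ definition above) =====
theorem FinishCorner_spec : Claim_equal_FinishCorner := by
  intro cA cB _
  unfold Spec_FinishCorner
  rcases caseSix cB with hB | hB | hB | hB | hB | hB | ⟨hB1, hB2, hB3, hB4, hB5, hB6⟩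
  · rcases caseSix cA with hA | hA | hA | hA | hA | hA | ⟨hA1, hA2, hA3, hA4, hA5, hA6⟩ <;>
      first
        | rw [FinA_X (hmisA hA1 hA2 hA3 hA4 hA5 hA6), FinAltA_X hA1 hA2 hA3 hA4 hA5 hA6]
        | (subst_vars;
           simp [FinishCorner, FinishCorner_alt, outerA, innerA, scanB, tableB, pyCharStr,
             PySem.Str.slice, PySem.List.slice_from_one])
  · rcases caseSix cA with hA | hA | hA | hA | hA | hA | ⟨hA1, hA2, hA3, hA4, hA5, hA6⟩ <;>
      first
        | rw [FinA_X (hmisA hA1 hA2 hA3 hA4 hA5 hA6), FinAltA_X hA1 hA2 hA3 hA4 hA5 hA6]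
        | (subst_vars;
           simp [FinishCorner, FinishCorner_alt, outerA, innerA, scanB, tableB, pyCharStr,
             PySem.Str.slice, PySem.List.slice_from_one])
  · rcases caseSix cA with hA | hA | hA | hA | hA | hA | ⟨hA1, hA2, hA3, hA4, hA5, hA6⟩ <;>
      first
        | rw [FinA_X (hmisA hA1 hA2 hA3 hA4 hA5 hA6), FinAltA_X hA1 hA2 hA3 hA4 hA5 hA6]
        | (subst_vars;
           simp [FinishCorner, FinishCorner_alt, outerA, innerA, scanB, tableB, pyCharStr,
             PySem.Str.slice, PySem.List.slice_from_one])
  · rcases caseSix cA with hA | hA | hA | hA | hA | hA | ⟨hA1, hA2, hA3, hA4, hA5, hA6⟩ <;>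
      first
        | rw [FinA_X (hmisA hA1 hA2 hA3 hA4 hA5 hA6), FinAltA_X hA1 hA2 hA3 hA4 hA5 hA6]
        | (subst_vars;
           simp [FinishCorner, FinishCorner_alt, outerA, innerA, scanB, tableB, pyCharStr,
             PySem.Str.slice, PySem.List.slice_from_one])
  · rcases caseSix cA with hA | hA | hA | hA | hA | hA | ⟨hA1, hA2, hA3, hA4, hA5, hA6⟩ <;>
      first
        | rw [FinA_X (hmisA hA1 hA2 hA3 hA4 hA5 hA6), FinAltA_X hA1 hA2 hA3 hA4 hA5 hA6]
        | (subst_vars;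
           simp [FinishCorner, FinishCorner_alt, outerA, innerA, scanB, tableB, pyCharStr,
             PySem.Str.slice, PySem.List.slice_from_one])
  · rcases caseSix cA with hA | hA | hA | hA | hA | hA | ⟨hA1, hA2, hA3, hA4, hA5, hA6⟩ <;>
      first
        | rw [FinA_X (hmisA hA1 hA2 hA3 hA4 hA5 hA6), FinAltA_X hA1 hA2 hA3 hA4 hA5 hA6]
        | (subst_vars;
           simp [FinishCorner, FinishCorner_alt, outerA, innerA, scanB, tableB, pyCharStr,
             PySem.Str.slice, PySem.List.slice_from_one])
  · rw [FinA_X (hmisB hB1 hB2 hB3 hB4 hB5 hB6), FinAltB_X hB1 hB2 hB3 hB4 hB5 hB6]
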